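-- pv_equiv track=rewrite | github.com/gradhouse/gradhouse | src/gradhouse/aws/s3_client.py | _parse_aws_ls_output
-- ===== SOURCE A (Python) =====
-- from typing import List, Dict, Optional
--
-- def _parse_aws_ls_output(output: str) -> List[Dict[str, str]]:
--     """
--     Parse the output of the AWS CLI 'aws s3 ls' command into a list of dictionaries.
--
--     Each line of the output is split into its components. Lines with four parts are assumed
--     to represent files (date, time, size, name), while lines with three parts are assumed to
--     represent directories (date, time, name). The parsed entries are returned as a list of
--     dictionaries with keys: 'date', 'time', 'size', and 'name'. For directories, 'size' is None.
--
--     :param output: str, the raw string output from the AWS CLI 'aws s3 ls' command.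
--
--     :return: List of dictionaries, each containing keys: 'date', 'time', 'size', and 'name'.
--              For directories, 'size' will be None.
--
--     :raises ValueError: If a line in the output does not match the expected format.
--     """
--
--     entries = []
--     for line in output.strip().splitlines():
--         parts = line.split()
--         if len(parts) == 4:
--             date, time, size, name = parts
--             entries.append({'date': date, 'time': time, 'size': size, 'name': name})
--         elif len(parts) == 3:
--             date, time, name = parts
--             entries.append({'date': date, 'time': time, 'size': None, 'name': name})
--         elif len(parts) > 0:  # raise on malformed lines
--             raise ValueError(f"Unexpected line format in aws s3 ls output: '{line}'")
--         else:
--             # Ignore empty lines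
--             pass
--
--     return entries
-- ===== SOURCE B (Python) =====
-- import re
-- from typing import List, Dict, Optional
--
-- _FILE_RE = re.compile(r'\s*(\S+)\s+(\S+)\s+(\S+)\s+(\S+)\s*$')
-- _DIR_RE = re.compile(r'\s*(\S+)\s+(\S+)\s+(\S+)\s*$')
--
--
-- def _parse_aws_ls_output(output: str) -> List[Dict[str, str]]:
--     """Regex-driven parser for 'aws s3 ls' output (pattern matching instead of
--     tokenize-then-count)."""
--     entries = []
--     for line in output.strip().splitlines():
--         m = _FILE_RE.fullmatch(line)
--         if m:
--             date, time, size, name = m.groups()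
--             entries.append({'date': date, 'time': time, 'size': size, 'name': name})
--             continue
--         m = _DIR_RE.fullmatch(line)
--         if m:
--             date, time, name = m.groups()
--             entries.append({'date': date, 'time': time, 'size': None, 'name': name})
--             continue
--         if line.strip():
--             raise ValueError(f"Unexpected line format in aws s3 ls output: '{line}'")
--     return entries
-- ===== Notes on version B (the rewrite author's own statement) =====
-- stated objective: idiomatic
-- what changed: Replaces the tokenize-then-count-branches parser with a regex-driven one: each line is matched against an anchored 4-group file pattern, then a 3-group directory pattern, and a non-blank line matching neither raises; same raise-on-malformed behaviour.
import Mathlib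
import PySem

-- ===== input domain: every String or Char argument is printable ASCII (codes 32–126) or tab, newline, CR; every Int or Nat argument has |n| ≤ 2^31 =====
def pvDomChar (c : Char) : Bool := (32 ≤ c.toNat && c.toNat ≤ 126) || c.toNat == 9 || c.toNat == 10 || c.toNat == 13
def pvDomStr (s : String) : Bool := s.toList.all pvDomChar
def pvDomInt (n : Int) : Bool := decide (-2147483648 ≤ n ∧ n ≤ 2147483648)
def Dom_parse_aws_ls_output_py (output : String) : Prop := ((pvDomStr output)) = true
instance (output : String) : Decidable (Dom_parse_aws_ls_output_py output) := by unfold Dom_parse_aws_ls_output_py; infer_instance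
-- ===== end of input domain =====

-- B replaces A's tokenize-then-count branching by a regex-driven parser (anchored
-- file/directory patterns tried per line); same cost, different parsing strategy.

-- ===== PORT A =====
-- Port of A: split each line, branch on the token count.  In the 'len(parts) > 0'
-- branch Python raises ValueError; those inputs are excluded by Pre_ below and the
-- port leaves `entries` unchanged there.
def parse_aws_ls_output_py (output : String) : List (List (String × Option String)) :=
  (PySem.Str.splitlines (PySem.Str.strip output)).foldl (fun entries line =>
    let parts := PySem.Str.split₀ line
    if parts.length = 4 then
      -- date, time, size, name = parts  (tuple unpacking, ported positionally)
      let date := PySem.List.pyGetD parts 0 ""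
      let time := PySem.List.pyGetD parts 1 ""
      let size := PySem.List.pyGetD parts 2 ""
      let name := PySem.List.pyGetD parts 3 ""
      entries ++ [[("date", some date), ("time", some time),
                   ("size", some size), ("name", some name)]]
    else if parts.length = 3 then
      -- date, time, name = parts
      let date := PySem.List.pyGetD parts 0 ""
      let time := PySem.List.pyGetD parts 1 ""
      let name := PySem.List.pyGetD parts 2 ""
      entries ++ [[("date", some date), ("time", some time),
                   ("size", (none : Option String)), ("name", some name)]]
    else if parts.length > 0 then
      entries  -- Python: raise ValueError (outside Pre_)
    else
      entries) []

-- ===== PORT B =====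
-- Hand port of re.fullmatch for the anchored pattern `\s*(\S+)(\s+(\S+))^{n-1}\s*$`
-- with n capture groups: `\s` is exactly Python's str whitespace (PySem.Chars.isspace),
-- `(\S+)` is a greedy maximal non-space run (takeWhile), `\s+` a nonempty space run.
-- Exact for these patterns: greedy matching of `\S+`/`\s+` is deterministic here.
def reGroups (n : Nat) (cs : List Char) : Option (List (List Char)) :=
  if htok : (cs.takeWhile (fun c => !PySem.Chars.isspace c)).isEmpty then none
  else
    match n with
    | 0 => none
    | 1 =>
      if (cs.dropWhile (fun c => !PySem.Chars.isspace c)).all PySem.Chars.isspace then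
        some [cs.takeWhile (fun c => !PySem.Chars.isspace c)]
      else none
    | m + 2 =>
      if (cs.dropWhile (fun c => !PySem.Chars.isspace c)).isEmpty then none
      else
        (reGroups (m + 1)
          ((cs.dropWhile (fun c => !PySem.Chars.isspace c)).dropWhile PySem.Chars.isspace)).map
          (cs.takeWhile (fun c => !PySem.Chars.isspace c) :: ·)
termination_by cs.length
decreasing_by
  have h0 : ((cs.dropWhile (fun c => !PySem.Chars.isspace c)).dropWhile PySem.Chars.isspace).length
      ≤ (cs.dropWhile (fun c => !PySem.Chars.isspace c)).length := List.length_dropWhile_le _ _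
  have h2 : (cs.takeWhile (fun c => !PySem.Chars.isspace c)).length
      + (cs.dropWhile (fun c => !PySem.Chars.isspace c)).length = cs.length := by
    rw [← List.length_append, List.takeWhile_append_dropWhile]
  have h4 : 1 ≤ (cs.takeWhile (fun c => !PySem.Chars.isspace c)).length :=
    List.length_pos_iff.mpr (by simpa [List.isEmpty_iff] using htok)
  omega

def reFullmatch (n : Nat) (cs : List Char) : Option (List (List Char)) :=
  reGroups n (cs.dropWhile PySem.Chars.isspace)

-- Port of B: try the 4-group file pattern, then the 3-group directory pattern;
-- a non-blank line matching neither makes Python raise ValueError (outside Pre_).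
def parse_aws_ls_output_py_alt (output : String) : List (List (String × Option String)) :=
  (PySem.Str.splitlines (PySem.Str.strip output)).foldl (fun entries line =>
    match reFullmatch 4 line.toList with
    | some [d, t, s, n] =>
        entries ++ [[("date", some (String.ofList d)), ("time", some (String.ofList t)),
                     ("size", some (String.ofList s)), ("name", some (String.ofList n))]]
    | some _ => entries  -- unreachable: reFullmatch 4 yields exactly 4 groups
    | none =>
      match reFullmatch 3 line.toList with
      | some [d, t, n] =>
          entries ++ [[("date", some (String.ofList d)), ("time", some (String.ofList t)),
                       ("size", (none : Option String)), ("name", some (String.ofList n))]]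
      | some _ => entries  -- unreachable
      | none =>
        if (PySem.Str.strip line).toList.isEmpty then entries
        else entries  -- Python: raise ValueError (outside Pre_)
    ) []

-- ===== PRECONDITION & SPEC =====
-- Pre_ excludes exactly the inputs on which A raises ValueError: some non-blank
-- line of the output whose whitespace-split token count is neither 3 nor 4.
def Pre_parse_aws_ls_output_py (output : String) : Prop :=
  ∀ line ∈ PySem.Str.splitlines (PySem.Str.strip output),
    (PySem.Str.split₀ line).length = 0 ∨ (PySem.Str.split₀ line).length = 3 ∨
      (PySem.Str.split₀ line).length = 4
instance (output : String) : Decidable (Pre_parse_aws_ls_output_py output) := by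
  unfold Pre_parse_aws_ls_output_py; infer_instance

def pvWitness_parse_aws_ls_output_py : String :=
  "2024-05-01 12:00:00 1024 report.txt\n2024-05-01 12:00:00 photos/\n"

def Spec_parse_aws_ls_output_py (output : String) (out : List (List (String × Option String))) : Prop := out = parse_aws_ls_output_py_alt output
instance (output : String) (out : List (List (String × Option String))) : Decidable (Spec_parse_aws_ls_output_py output out) := by unfold Spec_parse_aws_ls_output_py; infer_instance

-- ===== CLAIM (what is proved, stated in full; the proofs are below) =====
def Claim_equal_parse_aws_ls_output_py : Prop := ∀ (output : String), Dom_parse_aws_ls_output_py output → Pre_parse_aws_ls_output_py output → Spec_parse_aws_ls_output_py output (parse_aws_ls_output_py output)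

-- ===== LEMMAS AND PROOFS =====

-- Reference tokenisation: the whitespace-separated words of `cs`, front to back.
def tokList (cs : List Char) : List (List Char) :=
  if h : cs.dropWhile PySem.Chars.isspace = [] then []
  else ((cs.dropWhile PySem.Chars.isspace).takeWhile (fun c => !PySem.Chars.isspace c)) ::
    tokList ((cs.dropWhile PySem.Chars.isspace).dropWhile (fun c => !PySem.Chars.isspace c))
termination_by cs.length
decreasing_by
  have h1 : (cs.dropWhile PySem.Chars.isspace).length ≤ cs.length := List.length_dropWhile_le _ _
  have h2 : ((cs.dropWhile PySem.Chars.isspace).takeWhile (fun c => !PySem.Chars.isspace c)).length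
      + ((cs.dropWhile PySem.Chars.isspace).dropWhile (fun c => !PySem.Chars.isspace c)).length
      = (cs.dropWhile PySem.Chars.isspace).length := by
    rw [← List.length_append, List.takeWhile_append_dropWhile]
  have h4 : 1 ≤ ((cs.dropWhile PySem.Chars.isspace).takeWhile (fun c => !PySem.Chars.isspace c)).length := by
    match hc : cs.dropWhile PySem.Chars.isspace with
    | [] => exact absurd hc h
    | c :: t =>
      have hsp : PySem.Chars.isspace c = false := by
        have := List.head_dropWhile_not PySem.Chars.isspace (l := cs) (by rw [hc]; simp)
        simpa [hc] using this
      simp [hsp]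
  omega

lemma tokList_cons_space (c : Char) (rest : List Char) (h : PySem.Chars.isspace c = true) :
    tokList (c :: rest) = tokList rest := by
  rw [tokList.eq_def]; conv_rhs => rw [tokList.eq_def]
  simp [h]

lemma tokList_nil : tokList [] = [] := by
  rw [tokList.eq_def]; simp

lemma go_acc (cs : List Char) : ∀ cur acc,
    PySem.Chars.split₀.go cs cur acc = acc.reverse ++ PySem.Chars.split₀.go cs cur [] := by
  induction cs with
  | nil => intro cur acc; by_cases h : cur.isEmpty <;> simp [PySem.Chars.split₀.go, h]
  | cons c rest ih =>
    intro cur acc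
    by_cases h : PySem.Chars.isspace c
    · by_cases hc : cur.isEmpty <;>
        simp [PySem.Chars.split₀.go, h, hc, ih [] acc, ih [] [cur.reverse],
          ih [] (cur.reverse :: acc)]
    · simp [PySem.Chars.split₀.go, h, ih (c :: cur) acc]

lemma go_tokList (cs : List Char) : ∀ cur,
    PySem.Chars.split₀.go cs cur [] =
      if cur = [] then tokList cs
      else (cur.reverse ++ cs.takeWhile (fun c => !PySem.Chars.isspace c)) ::
        tokList (cs.dropWhile (fun c => !PySem.Chars.isspace c)) := by
  induction cs with
  | nil =>
    intro cur
    by_cases h : cur = []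
    · simp [PySem.Chars.split₀.go, h, tokList]
    · simp [PySem.Chars.split₀.go, h, List.isEmpty_iff, tokList]
  | cons c rest ih =>
    intro cur
    by_cases h : PySem.Chars.isspace c
    · by_cases hc : cur = []
      · simp [PySem.Chars.split₀.go, h, hc, ih [],
          tokList_cons_space c rest h]
      · rw [PySem.Chars.split₀.go]
        simp only [h, List.isEmpty_iff, hc, if_true, if_false]
        rw [go_acc rest [] [cur.reverse], ih []]
        simp [h, tokList_cons_space c rest h]
    · have hb : PySem.Chars.isspace c = false := by simpa using h
      rw [PySem.Chars.split₀.go]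
      simp only [hb]
      rw [ih (c :: cur)]
      by_cases hc : cur = []
      · subst hc
        conv_rhs => rw [tokList.eq_def]
        simp [hb]
      · simp [hc, hb]

lemma split₀_eq_tokList (cs : List Char) : PySem.Chars.split₀ cs = tokList cs := by
  have := go_tokList cs []
  simpa [PySem.Chars.split₀] using this

lemma reGroups_eq (n : Nat) : ∀ cs : List Char,
    reGroups (n + 1) (cs.dropWhile PySem.Chars.isspace) =
      if (tokList cs).length = n + 1 then some (tokList cs) else none := by
  induction n with
  | zero =>
    intro cs
    rw [reGroups, tokList]
    by_cases h : cs.dropWhile PySem.Chars.isspace = []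
    · simp [h]
    · match hc : cs.dropWhile PySem.Chars.isspace with
      | [] => exact absurd hc h
      | c :: t =>
        have hsp : PySem.Chars.isspace c = false := by
          have := List.head_dropWhile_not PySem.Chars.isspace (l := cs) (by rw [hc]; simp)
          simpa [hc] using this
        simp only [hc] at h ⊢
        simp only [List.takeWhile_cons, List.dropWhile_cons, hsp, Bool.not_false, if_true,
          dif_neg h]
        rw [dif_neg (by simp)]
        by_cases hall : (t.dropWhile (fun c => !PySem.Chars.isspace c)).all PySem.Chars.isspace
        · have hnil : tokList (t.dropWhile (fun c => !PySem.Chars.isspace c)) = [] := by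
            rw [tokList.eq_def]
            simp [List.dropWhile_eq_nil_iff.mpr (by simpa [List.all_eq_true] using hall)]
          simp [hall, hnil]
        · have hne : tokList (t.dropWhile (fun c => !PySem.Chars.isspace c)) ≠ [] := by
            rw [tokList.eq_def]
            intro hcon
            by_cases hd : (t.dropWhile (fun c => !PySem.Chars.isspace c)).dropWhile
                PySem.Chars.isspace = []
            · exact hall (by simpa [List.all_eq_true] using List.dropWhile_eq_nil_iff.mp hd)
            · simp [hd] at hcon
          simp [hall, hne]
  | succ m ih =>
    intro cs
    rw [reGroups, tokList]
    by_cases h : cs.dropWhile PySem.Chars.isspace = []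
    · simp [h]
    · match hc : cs.dropWhile PySem.Chars.isspace with
      | [] => exact absurd hc h
      | c :: t =>
        have hsp : PySem.Chars.isspace c = false := by
          have := List.head_dropWhile_not PySem.Chars.isspace (l := cs) (by rw [hc]; simp)
          simpa [hc] using this
        simp only [hc] at h ⊢
        simp only [List.takeWhile_cons, List.dropWhile_cons, hsp, Bool.not_false, if_true,
          dif_neg h]
        rw [dif_neg (by simp)]
        by_cases hrest : t.dropWhile (fun c => !PySem.Chars.isspace c) = []
        · have hnil : tokList (t.dropWhile (fun c => !PySem.Chars.isspace c)) = [] := by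
            rw [tokList.eq_def]; simp [hrest]
          simp [hrest, tokList_nil]
        · rw [if_neg (by simpa [List.isEmpty_iff] using hrest)]
          rw [ih (t.dropWhile (fun c => !PySem.Chars.isspace c))]
          by_cases hlen : (tokList (t.dropWhile (fun c => !PySem.Chars.isspace c))).length = m + 1
          · simp [hlen]
          · simp [hlen]

lemma reFullmatch_eq (cs : List Char) (n : Nat) :
    reFullmatch (n + 1) cs = if (tokList cs).length = n + 1 then some (tokList cs) else none := by
  rw [reFullmatch, reGroups_eq]

-- Per-line agreement of the two loop bodies, under Pre_'s token-count condition.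
lemma line_eq (line : String)
    (h : (PySem.Str.split₀ line).length = 0 ∨ (PySem.Str.split₀ line).length = 3 ∨
      (PySem.Str.split₀ line).length = 4)
    (entries : List (List (String × Option String))) :
    (let parts := PySem.Str.split₀ line
     if parts.length = 4 then
       let date := PySem.List.pyGetD parts 0 ""
       let time := PySem.List.pyGetD parts 1 ""
       let size := PySem.List.pyGetD parts 2 ""
       let name := PySem.List.pyGetD parts 3 ""
       entries ++ [[("date", some date), ("time", some time),
                    ("size", some size), ("name", some name)]]
     else if parts.length = 3 then
       let date := PySem.List.pyGetD parts 0 ""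
       let time := PySem.List.pyGetD parts 1 ""
       let name := PySem.List.pyGetD parts 2 ""
       entries ++ [[("date", some date), ("time", some time),
                    ("size", (none : Option String)), ("name", some name)]]
     else if parts.length > 0 then entries
     else entries) =
    (match reFullmatch 4 line.toList with
     | some [d, t, s, n] =>
         entries ++ [[("date", some (String.ofList d)), ("time", some (String.ofList t)),
                      ("size", some (String.ofList s)), ("name", some (String.ofList n))]]
     | some _ => entries
     | none =>
       match reFullmatch 3 line.toList with
       | some [d, t, n] =>
           entries ++ [[("date", some (String.ofList d)), ("time", some (String.ofList t)),
                        ("size", (none : Option String)), ("name", some (String.ofList n))]]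
       | some _ => entries
       | none =>
         if (PySem.Str.strip line).toList.isEmpty then entries
         else entries) := by
  have hmap : List.map String.toList (PySem.Str.split₀ line) = tokList line.toList := by
    rw [PySem.Str.split₀_map_toList, split₀_eq_tokList]
  have hlen : (tokList line.toList).length = (PySem.Str.split₀ line).length := by
    rw [← hmap, List.length_map]
  rcases h with h | h | h
  · -- 0 tokens: both sides skip the line
    have h4 : reFullmatch 4 line.toList = none := by
      rw [reFullmatch_eq]; simp [hlen, h]
    have h3 : reFullmatch 3 line.toList = none := by
      rw [reFullmatch_eq]; simp [hlen, h]
    simp [h4, h3, h]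
  · -- 3 tokens: directory line
    match hp : PySem.Str.split₀ line with
    | [a, b, c] =>
      have h4 : reFullmatch 4 line.toList = none := by
        rw [reFullmatch_eq]; simp [hlen, h]
      have h3 : reFullmatch 3 line.toList = some [a.toList, b.toList, c.toList] := by
        rw [reFullmatch_eq, if_pos (by rw [hlen, h]), ← hmap, hp]; simp
      simp [h4, h3, String.ofList_toList, PySem.List.pyGetD_ofNat']
    | [] | [_] | [_, _] | _ :: _ :: _ :: _ :: _ => rw [hp] at h; simp at h
  · -- 4 tokens: file line
    match hp : PySem.Str.split₀ line with
    | [a, b, c, d] =>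
      have h4 : reFullmatch 4 line.toList =
          some [a.toList, b.toList, c.toList, d.toList] := by
        rw [reFullmatch_eq, if_pos (by rw [hlen, h]), ← hmap, hp]; simp
      simp [h4, String.ofList_toList, PySem.List.pyGetD_ofNat']
    | [] | [_] | [_, _] | [_, _, _] | _ :: _ :: _ :: _ :: _ :: _ => rw [hp] at h; simp at h

-- ===== VERDICT (by name: the statement is the Claim_ definition above) =====
theorem parse_aws_ls_output_py_spec : Claim_equal_parse_aws_ls_output_py := by
  intro output _ hpre
  unfold Spec_parse_aws_ls_output_py parse_aws_ls_output_py parse_aws_ls_output_py_alt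
  exact PySem.List.foldl_congr_mem _ _ _ _
    (fun entries line hline => line_eq line (hpre line hline) entries)
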